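-- pv_equiv track=rewrite | github.com/ZhengWeiLim/cultural-keywords-osf | src/evaluation.py | get_list_of_count_by_range
-- ===== SOURCE A (Python) =====
-- def get_list_of_count_by_range(arange, dlist):
--     count = []
--     dlist.sort()
--     for i, x in enumerate(arange):
--         if i < len(arange) - 1:
--             group = list(filter(lambda d: d >= x and d < arange[i + 1], dlist))
--         else:
--             group = list(filter(lambda d: d >= x, dlist))
--         dlist = [d for d in dlist if d not in group]
--         count.append(len(group))
--     return count
-- ===== SOURCE B (Python) =====
-- def get_list_of_count_by_range(arange, dlist):
--     # Element-major single pass: each element is counted in the FIRST interval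
--     # that contains it (A's removal step means intervals claim elements in order).
--     m = len(arange)
--     counts = [0] * m
--     for d in dlist:
--         for i in range(m):
--             if d >= arange[i] and (i == m - 1 or d < arange[i + 1]):
--                 counts[i] += 1
--                 break
--     return counts
-- ===== Notes on version B (the rewrite author's own statement) =====
-- stated objective: alternative
-- what changed: A sorts, then per interval filters the remaining list and removes matched elements via per-element membership tests in the group; B makes one element-major pass, incrementing a histogram at each element's first matching interval, with no sort, no filtering rounds and no membership scans.
import Mathlib
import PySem

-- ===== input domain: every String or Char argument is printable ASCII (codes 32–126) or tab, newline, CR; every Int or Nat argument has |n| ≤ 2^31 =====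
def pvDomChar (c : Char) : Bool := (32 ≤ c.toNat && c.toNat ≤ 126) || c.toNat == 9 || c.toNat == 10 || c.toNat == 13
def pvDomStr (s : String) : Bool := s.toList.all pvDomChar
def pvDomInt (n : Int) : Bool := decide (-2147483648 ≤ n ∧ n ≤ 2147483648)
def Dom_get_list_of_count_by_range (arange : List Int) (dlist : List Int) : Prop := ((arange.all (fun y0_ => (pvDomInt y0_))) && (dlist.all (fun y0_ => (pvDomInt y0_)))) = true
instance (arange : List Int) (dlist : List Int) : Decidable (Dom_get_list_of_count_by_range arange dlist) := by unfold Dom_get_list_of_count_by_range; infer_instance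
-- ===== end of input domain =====

-- B replaces A's interval-major loop (filter + membership-based removal each round, with a sort)
-- with a single element-major pass that counts each element in its FIRST matching interval.
-- Note: A sorts dlist in place (observable mutation); B does not mutate. The equivalence proved
-- here is about the return value only.

-- ===== PORT A =====
def pvStepA (arange : List Int) (st : List Int × List Int) (p : Int × Int) : List Int × List Int :=
  let group :=
    if p.1 < (arange.length : Int) - 1 then
      st.2.filter (fun d => decide (d ≥ p.2) && decide (d < PySem.List.pyGetD arange (p.1 + 1) 0))
    else
      st.2.filter (fun d => decide (d ≥ p.2))
  (st.1 ++ [(group.length : Int)], st.2.filter (fun d => !group.contains d))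

def get_list_of_count_by_range (arange : List Int) (dlist : List Int) : List Int :=
  ((PySem.List.enumerate arange 0).foldl (pvStepA arange)
    ([], PySem.List.sorted dlist (fun x => x) false)).1

-- ===== PORT B =====
def pvCondB (arange : List Int) (m : Nat) (i : Nat) (d : Int) : Bool :=
  decide (d ≥ arange.getD i 0) && (i == m - 1 || decide (d < arange.getD (i + 1) 0))

-- first i in range(m) whose interval contains d (the inner 'for … break' of Source B)
def pvFirst (arange : List Int) (m : Nat) (d : Int) : Option Nat :=
  (List.range m).find? (fun i => pvCondB arange m i d)

def pvStepB (arange : List Int) (m : Nat) (counts : List Int) (d : Int) : List Int :=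
  match pvFirst arange m d with
  | some i => counts.set i (counts.getD i 0 + 1)
  | none => counts

def get_list_of_count_by_range_alt (arange : List Int) (dlist : List Int) : List Int :=
  dlist.foldl (pvStepB arange arange.length) (List.replicate arange.length 0)

-- ===== PRECONDITION & SPEC =====
def Spec_get_list_of_count_by_range (arange : List Int) (dlist : List Int) (out : List Int) : Prop := out = get_list_of_count_by_range_alt arange dlist
instance (arange : List Int) (dlist : List Int) (out : List Int) : Decidable (Spec_get_list_of_count_by_range arange dlist out) := by unfold Spec_get_list_of_count_by_range; infer_instance

-- ===== CLAIM (what is proved, stated in full; the proofs are below) =====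
def Claim_equal_get_list_of_count_by_range : Prop := ∀ (arange : List Int) (dlist : List Int), Dom_get_list_of_count_by_range arange dlist → Spec_get_list_of_count_by_range arange dlist (get_list_of_count_by_range arange dlist)

-- ===== LEMMAS AND PROOFS =====

-- find? over range: the first index satisfying p
theorem find?_range_eq_some_iff (p : Nat → Bool) (m : Nat) : ∀ i : Nat,
    (List.range m).find? p = some i ↔ i < m ∧ p i = true ∧ ∀ j, j < i → p j = false := by
  induction m with
  | zero => simp
  | succ m ih =>
    intro i
    rw [List.range_succ, List.find?_append]
    cases h : (List.range m).find? p with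
    | some k =>
      simp only [Option.some_or, Option.some.injEq]
      rw [ih] at h
      constructor
      · rintro rfl; exact ⟨by omega, h.2.1, h.2.2⟩
      · rintro ⟨hi, hpi, hfi⟩
        rcases Nat.lt_trichotomy i k with hlt | rfl | hgt
        · exact absurd hpi (by simp [h.2.2 i hlt])
        · rfl
        · exact absurd (h.2.1) (by simp [hfi k hgt])
    | none =>
      simp only [Option.none_or, List.find?_cons, List.find?_nil]
      have hnone : ∀ j, j < m → p j = false := by
        intro j hj
        by_contra hc
        have : ∃ x ∈ List.range m, p x = true := ⟨j, List.mem_range.mpr hj, by simpa using hc⟩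
        rw [← List.find?_isSome, h] at this
        simp at this
      by_cases hpm : p m = true
      · simp only [hpm, Option.some.injEq]
        constructor
        · rintro rfl; exact ⟨by omega, hpm, hnone⟩
        · rintro ⟨hi, hpi, hfi⟩
          rcases Nat.lt_trichotomy i m with hlt | rfl | hgt
          · exact absurd hpi (by simp [hnone i hlt])
          · rfl
          · omega
      · simp only [Bool.not_eq_true] at hpm
        simp only [hpm]
        constructor
        · rintro ⟨⟩
        · rintro ⟨hi, hpi, hfi⟩
          rcases Nat.lt_trichotomy i m with hlt | rfl | hgt
          · exact absurd hpi (by simp [hnone i hlt])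
          · exact absurd hpi (by simp [hpm])
          · omega

theorem pvFirst_eq_some_iff (arange : List Int) (d : Int) (i : Nat) :
    pvFirst arange arange.length d = some i ↔
      i < arange.length ∧ pvCondB arange arange.length i d = true ∧
      ∀ j, j < i → pvCondB arange arange.length j d = false := by
  exact find?_range_eq_some_iff _ _ _

-- B-side histogram characterization
theorem B_loop (arange : List Int) (dl : List Int) :
    ∀ counts : List Int, counts.length = arange.length →
      dl.foldl (pvStepB arange arange.length) counts =
        (List.range arange.length).map
          (fun i => counts.getD i 0 + ((dl.filter (fun d => pvFirst arange arange.length d == some i)).length : Int)) := by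
  induction dl with
  | nil =>
    intro counts hlen
    simp only [List.foldl_nil, List.filter_nil, List.length_nil, Nat.cast_zero, add_zero]
    apply List.ext_getElem (by simp [hlen])
    intro i h1 h2
    simp only [List.getElem_map, List.getElem_range]
    rw [List.getD_eq_getElem counts 0 (by simp_all)]
  | cons d dl ih =>
    intro counts hlen
    rw [List.foldl_cons]
    have hslen : (pvStepB arange arange.length counts d).length = arange.length := by
      unfold pvStepB
      cases h : pvFirst arange arange.length d <;> simp [hlen]
    rw [ih _ hslen]
    apply List.map_congr_left
    intro i hi
    have him : i < arange.length := List.mem_range.mp hi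
    cases hfd : pvFirst arange arange.length d with
    | none =>
      simp [pvStepB, hfd]
    | some j =>
      have hj : j < arange.length := ((pvFirst_eq_some_iff arange d j).mp hfd).1
      simp only [pvStepB, hfd, List.filter_cons]
      rw [List.getD_eq_getElem _ 0 (by simp [hlen, him]), List.getElem_set]
      by_cases hij : j = i
      · subst hij
        simp only [beq_self_eq_true, if_pos trivial, List.length_cons]
        rw [List.getD_eq_getElem counts 0 (n := j) (by omega)]
        push_cast
        ring
      · have hne : (some j == some i) = false := by simpa using hij
        simp only [hij, if_false, hne, Bool.false_eq_true]
        rw [List.getD_eq_getElem counts 0 (n := i) (by omega)]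

-- A-side loop characterization: at step k the remaining list is the sorted input minus
-- everything an earlier interval matched, and each round appends that interval's first-match count
theorem A_loop (arange : List Int) (S : List Int) :
    ∀ (n k : Nat) (acc r : List Int), arange.length - k = n → k ≤ arange.length →
      r = S.filter (fun d => (List.range k).all (fun j => !pvCondB arange arange.length j d)) →
      ((PySem.List.enumerate (arange.drop k) (k : Int)).foldl (pvStepA arange) (acc, r)).1 =
        acc ++ (List.range' k (arange.length - k)).map
          (fun i => ((S.filter (fun d => pvFirst arange arange.length d == some i)).length : Int)) := by
  intro n
  induction n with
  | zero =>
    intro k acc r hn hk hr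
    have hkm : k = arange.length := by omega
    subst hkm
    simp [List.drop_length]
  | succ n ih =>
    intro k acc r hn hk hr
    have hkm : k < arange.length := by omega
    rw [List.drop_eq_getElem_cons hkm, PySem.List.enumerate_cons, List.foldl_cons]
    -- the step computes group = r.filter (pvCondB k ·)
    have hgroup :
        pvStepA arange (acc, r) ((k : Int), arange[k]) =
          (acc ++ [((r.filter (fun d => pvCondB arange arange.length k d)).length : Int)],
           r.filter (fun d => !(r.filter (fun d => pvCondB arange arange.length k d)).contains d)) := by
      unfold pvStepA
      by_cases hlast : k + 1 < arange.length
      · have hbr : ((k : Int) < (arange.length : Int) - 1) := by omega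
        have hne : (k == arange.length - 1) = false := by simp; omega
        have hpred : (fun d => decide (d ≥ arange[k]) &&
              decide (d < PySem.List.pyGetD arange ((k : Int) + 1) 0)) =
            (fun d => pvCondB arange arange.length k d) := by
          funext d
          have h1 : ((k : Int) + 1) = ((k + 1 : Nat) : Int) := by omega
          rw [h1, PySem.List.pyGetD_natCast]
          simp [pvCondB, hne, List.getElem?_eq_getElem hkm]
        simp only [if_pos hbr, hpred]
      · have hbr : ¬ ((k : Int) < (arange.length : Int) - 1) := by omega
        have heq : (k == arange.length - 1) = true := by simp; omega
        have hpred : (fun d => decide (d ≥ arange[k])) =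
            (fun d => pvCondB arange arange.length k d) := by
          funext d
          simp [pvCondB, heq, List.getElem?_eq_getElem hkm]
        simp only [if_neg hbr, hpred]
    -- counted group = first-match-at-k elements of S
    have hfirst : ∀ d, (pvCondB arange arange.length k d &&
          (List.range k).all (fun j => !pvCondB arange arange.length j d)) =
        (pvFirst arange arange.length d == some k) := by
      intro d
      rw [Bool.eq_iff_iff]
      simp only [Bool.and_eq_true, List.all_eq_true, List.mem_range, Bool.not_eq_true',
        beq_iff_eq, pvFirst_eq_some_iff]
      constructor
      · rintro ⟨h1, h2⟩; exact ⟨hkm, h1, fun j hj => h2 j hj⟩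
      · rintro ⟨_, h1, h2⟩; exact ⟨h1, fun j hj => h2 j hj⟩
    have hglen : r.filter (fun d => pvCondB arange arange.length k d) =
        S.filter (fun d => pvFirst arange arange.length d == some k) := by
      rw [hr, List.filter_filter]
      apply List.filter_congr
      intro d _
      exact hfirst d
    -- removal = dropping everything interval k matches (membership in group is by value)
    have hrem : r.filter (fun d => !(r.filter (fun d => pvCondB arange arange.length k d)).contains d) =
        S.filter (fun d => (List.range (k + 1)).all (fun j => !pvCondB arange arange.length j d)) := by
      have hcg : r.filter (fun d => !(r.filter (fun d => pvCondB arange arange.length k d)).contains d) =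
          r.filter (fun d => !pvCondB arange arange.length k d) := by
        apply List.filter_congr
        intro d hd
        have : (r.filter (fun d => pvCondB arange arange.length k d)).contains d =
            pvCondB arange arange.length k d := by
          rw [Bool.eq_iff_iff, List.contains_iff_mem, List.mem_filter]
          exact ⟨fun h => h.2, fun h => ⟨hd, h⟩⟩
        rw [this]
      rw [hcg, hr, List.filter_filter]
      apply List.filter_congr
      intro d _
      rw [Bool.eq_iff_iff]
      simp only [Bool.and_eq_true, List.all_eq_true, List.mem_range, Bool.not_eq_true']
      constructor
      · rintro ⟨h1, h2⟩ j hj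
        rcases Nat.lt_or_ge j k with h | h
        · exact h2 j h
        · have : j = k := by omega
          subst this; simpa using h1
      · intro h
        exact ⟨by simpa using h k (by omega), fun j hj => h j (by omega)⟩
    rw [hgroup, hrem, hglen]
    have hrng : arange.length - k = (arange.length - (k + 1)) + 1 := by omega
    rw [hrng, List.range'_succ, List.map_cons]
    have hcast : ((k : Int) + 1) = (((k + 1 : Nat)) : Int) := by omega
    rw [hcast, ih (k + 1) _ _ (by omega) (by omega) rfl]
    simp

-- ===== VERDICT (by name: the statement is the Claim_ definition above) =====
theorem get_list_of_count_by_range_spec : Claim_equal_get_list_of_count_by_range := by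
  intro arange dlist _
  unfold Spec_get_list_of_count_by_range get_list_of_count_by_range get_list_of_count_by_range_alt
  have hA := A_loop arange (PySem.List.sorted dlist (fun x => x) false) (arange.length) 0 []
    (PySem.List.sorted dlist (fun x => x) false) (by omega) (by omega) (by simp)
  have hB := B_loop arange dlist (List.replicate arange.length 0) (by simp)
  simp only [List.drop_zero, Nat.cast_zero, Nat.sub_zero] at hA
  rw [hA, hB]
  simp only [List.nil_append, ← List.range_eq_range']
  apply List.map_congr_left
  intro i _
  have hperm : (PySem.List.sorted dlist (fun x => x) false).Perm dlist :=
    PySem.List.sorted_perm dlist (fun x => x) false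
  rw [(hperm.filter _).length_eq]
  simp
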